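-- pv_equiv track=rewrite | github.com/momostein/nim | player.py | _endgame
-- ===== SOURCE A (Python) =====
-- def _endgame(state):
--     """Bepaalt de beste zet tijdens de endgame."""
--
--     # 1 bij een oneven aantal niet-lege stapels
--     # 0 bij een even aantal niet-lege stapels
--     odd = sum(1 for x in state if x > 0) % 2
--
--     # Aantal tokens en de index van de grootste stapel
--     big_heap = max(state)
--     big_index = state.index(big_heap)
--
--     # Laat 1 token achter bij een oneven aantal niet-lege stapels
--     # Neem de hele stapel bij een even aantal niet-lege stapels
--     amount = big_heap - odd
--
--     # Je moet minstens 1 token nemen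
--     if amount < 1:
--         amount = 1
--
--     return big_index, amount
-- ===== SOURCE B (Python) =====
-- def _endgame(state):
--     """Bepaalt de beste zet tijdens de endgame.
--
--     Sorteer de genummerde stapels aflopend op grootte; dankzij de stabiele
--     sortering staat de eerste grootste stapel vooraan."""
--     big_index, big_heap = sorted(enumerate(state), key=lambda p: p[1], reverse=True)[0]
--     odd = sum(x > 0 for x in state) % 2
--     return big_index, max(big_heap - odd, 1)
-- ===== Notes on version B (the rewrite author's own statement) =====
-- stated objective: alternative
-- what changed: Replaces A's max()+list.index() scans with a sort-based argmax: stably sort the enumerated heaps in descending order and take the first (index, size) pair, which is the first largest heap by stability.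
-- outside the precondition, e.g. on _endgame([]): A raises ValueError, B raises IndexError
import Mathlib
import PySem

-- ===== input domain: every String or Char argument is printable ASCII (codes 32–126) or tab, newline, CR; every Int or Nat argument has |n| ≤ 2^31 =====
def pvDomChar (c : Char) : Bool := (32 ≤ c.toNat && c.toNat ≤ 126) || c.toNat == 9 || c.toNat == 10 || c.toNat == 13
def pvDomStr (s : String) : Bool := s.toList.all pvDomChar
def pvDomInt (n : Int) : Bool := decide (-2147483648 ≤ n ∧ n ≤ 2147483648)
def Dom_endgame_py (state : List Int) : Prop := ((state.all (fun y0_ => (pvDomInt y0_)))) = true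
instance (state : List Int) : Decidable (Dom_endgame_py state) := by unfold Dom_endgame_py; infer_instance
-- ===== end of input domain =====

-- B finds the biggest heap by stably sorting the enumerated heaps in descending order and
-- taking the first pair (sort-based argmax), instead of A's max() + list.index() scans;
-- return values proved equal on non-empty input ('alternative', not claimed faster).


-- ===== PORT A =====
def endgame_py (state : List Int) : Int × Int :=
  -- odd = sum(1 for x in state if x > 0) % 2
  let odd : Int := PySem.Int.mod (state.foldl (fun acc x => if x > 0 then acc + 1 else acc) 0) 2
  -- big_heap = max(state); raises ValueError on [] (excluded by Pre_)
  match PySem.List.max? state (fun y => y) with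
  | none => (0, 0)
  | some big_heap =>
    -- big_index = state.index(big_heap); big_heap ∈ state so the lookup succeeds
    let big_index : Int := match PySem.List.index? state big_heap with
      | some i => (i : Int)
      | none => 0
    let amount := big_heap - odd
    (big_index, if amount < 1 then 1 else amount)

-- ===== PORT B =====
-- first element of sorted(enumerate(state), key=lambda p: p[1], reverse=True): the stable
-- descending sort puts the first largest heap in front; subscripting the empty sorted list
-- raises IndexError (excluded by Pre_)
def endgame_py_alt (state : List Int) : Int × Int :=
  match PySem.List.sorted (PySem.List.enumerate state) (fun p => p.2) true with
  | [] => (0, 0)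
  | p :: _ =>
    -- odd = sum(x > 0 for x in state) % 2
    let odd : Int := PySem.Int.mod (state.foldl (fun acc x => acc + (if x > 0 then 1 else 0)) 0) 2
    (p.1, max (p.2 - odd) 1)

-- ===== PRECONDITION & SPEC =====
-- Pre_ excludes only the empty list, on which both Pythons raise (A: ValueError from max(), B: IndexError from the subscript).
def Pre_endgame_py (state : List Int) : Prop := state ≠ []
instance (state : List Int) : Decidable (Pre_endgame_py state) := by unfold Pre_endgame_py; infer_instance
def pvWitness_endgame_py : List Int := ([3, 1, 0])

def Spec_endgame_py (state : List Int) (out : Int × Int) : Prop := out = endgame_py_alt state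
instance (state : List Int) (out : Int × Int) : Decidable (Spec_endgame_py state out) := by unfold Spec_endgame_py; infer_instance

-- ===== CLAIM =====
def Claim_equal_endgame_py : Prop := ∀ (state : List Int), Dom_endgame_py state → Pre_endgame_py state → Spec_endgame_py state (endgame_py state)

-- ===== LEMMAS AND PROOFS =====

-- the head of the reverse-insertion fold (= sorted reverse=True, by
-- PySem.List.sorted_rev_eq_foldl_insertBy) is the strict running maximum of the pairs' values
theorem head_foldl_ins (l : List (Int × Int)) : ∀ (h : Int × Int) (t' : List (Int × Int)),
    ∃ r, l.foldl (fun acc x => PySem.List.insertBy (fun a b => decide (b.2 < a.2)) x acc) (h :: t')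
         = l.foldl (fun b x => if b.2 < x.2 then x else b) h :: r := by
  induction l with
  | nil => intro h t'; exact ⟨t', rfl⟩
  | cons x l ih =>
    intro h t'
    simp only [List.foldl_cons]
    by_cases hx : h.2 < x.2
    · have : PySem.List.insertBy (fun a b => decide (b.2 < a.2)) x (h :: t') = x :: h :: t' := by
        simp [PySem.List.insertBy, hx]
      rw [this, if_pos hx]
      exact ih x (h :: t')
    · have : PySem.List.insertBy (fun a b => decide (b.2 < a.2)) x (h :: t')
           = h :: PySem.List.insertBy (fun a b => decide (b.2 < a.2)) x t' := by
        simp [PySem.List.insertBy, hx]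
      rw [this, if_neg hx]
      exact ih h _

-- characterisation of the strict running maximum over enumerate: value = running max,
-- index = first index attaining it (updated only on strict increase)
theorem egStep_char (t : List Int) : ∀ (s i h : Int),
    (PySem.List.enumerate t s).foldl (fun b x => if b.2 < x.2 then x else b) (i, h)
      = (if h < t.foldl max h then s + ((t.idxOf (t.foldl max h) : Nat) : Int) else i,
         t.foldl max h) := by
  induction t with
  | nil => intro s i h; simp [PySem.List.enumerate_nil]
  | cons x t ih =>
    intro s i h
    rw [PySem.List.enumerate_cons, List.foldl_cons]
    by_cases hx : h < x
    · have hmax : max h x = x := by omega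
      have hstep : (if ((i, h) : Int × Int).2 < ((s, x) : Int × Int).2 then ((s, x) : Int × Int) else (i, h)) = (s, x) := by
        simp [hx]
      rw [hstep, ih (s + 1) s x]
      rw [show (x :: t).foldl max h = t.foldl max x by simp [List.foldl, hmax]]
      have hxle := (PySem.List.le_foldl_max t x).1
      by_cases hlt : x < t.foldl max x
      · have hne : x ≠ t.foldl max x := by omega
        rw [if_pos hlt, if_pos (by omega), List.idxOf_cons_ne _ (by omega)]
        simp only [Prod.mk.injEq]
        constructor
        · push_cast; ring
        · trivial
      · have heq : t.foldl max x = x := by omega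
        rw [if_neg hlt, if_pos (by omega), heq, List.idxOf_cons_self]
        simp
    · have hmax : max h x = h := by omega
      have hstep : (if ((i, h) : Int × Int).2 < ((s, x) : Int × Int).2 then ((s, x) : Int × Int) else (i, h)) = (i, h) := by
        simp; omega
      rw [hstep, ih (s + 1) i h]
      rw [show (x :: t).foldl max h = t.foldl max h by simp [List.foldl, hmax]]
      have hxle : x ≤ h := by omega
      by_cases hlt : h < t.foldl max h
      · have hne : x ≠ t.foldl max h := by omega
        rw [if_pos hlt, if_pos hlt, List.idxOf_cons_ne _ (by omega)]
        simp only [Prod.mk.injEq]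
        constructor
        · push_cast; ring
        · trivial
      · rw [if_neg hlt, if_neg hlt]

theorem index?_eq_some_idxOf (xs : List Int) (v : Int) (h : v ∈ xs) :
    PySem.List.index? xs v = some (xs.idxOf v) := by
  induction xs with
  | nil => cases h
  | cons x t ih =>
    by_cases hx : x = v
    · subst hx; rw [PySem.List.index?_cons_self, List.idxOf_cons_self]
    · rcases List.mem_cons.mp h with h' | h'
      · exact absurd h'.symm hx
      · rw [PySem.List.index?_cons_of_ne _ hx, ih h', List.idxOf_cons_ne _ (by omega)]
        rfl

theorem endgame_py_spec : Claim_equal_endgame_py := by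
  intro state _ hpre
  unfold Spec_endgame_py
  rcases state with _ | ⟨a, t⟩
  · exact absurd rfl hpre
  unfold endgame_py endgame_py_alt
  -- B's parity loop equals A's parity loop
  have hodd : (a :: t).foldl (fun acc x => acc + (if x > 0 then 1 else 0)) (0 : Int)
            = (a :: t).foldl (fun acc x => if x > 0 then acc + 1 else acc) 0 := by
    refine PySem.List.foldl_congr_mem _ _ _ _ ?_
    intro acc x _
    split_ifs <;> omega
  rw [hodd]
  rw [PySem.List.max?_id_cons]
  rw [PySem.List.sorted_rev_eq_foldl_insertBy]
  rw [PySem.List.enumerate_cons]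
  obtain ⟨r, hr⟩ := head_foldl_ins (PySem.List.enumerate t (0 + 1)) (0, a) []
  have hscrut : List.foldl (fun acc x => PySem.List.insertBy (fun a b => decide (b.2 < a.2)) x acc) []
      (((0 : Int), a) :: PySem.List.enumerate t (0 + 1))
      = (PySem.List.enumerate t (0 + 1)).foldl (fun b x => if b.2 < x.2 then x else b) (0, a) :: r := by
    rw [List.foldl_cons]
    exact hr
  rw [hscrut, egStep_char t (0 + 1) 0 a]
  simp only []
  have hale := (PySem.List.le_foldl_max t a).1
  set M := t.foldl max a with hM
  have hIdx : PySem.List.index? (a :: t) M = some ((a :: t).idxOf M) := by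
    refine index?_eq_some_idxOf _ _ ?_
    rcases PySem.List.foldl_max_mem t a with h | h
    · rw [← hM] at h; rw [h]; exact List.mem_cons_self
    · exact List.mem_cons_of_mem _ h
  rw [hIdx]
  simp only []
  by_cases hlt : a < M
  · have hne : a ≠ M := by omega
    rw [if_pos hlt, List.idxOf_cons_ne _ (by omega)]
    simp only [Prod.mk.injEq]
    refine ⟨by push_cast; ring, ?_⟩
    rw [max_def]; split_ifs <;> omega
  · have heq : M = a := by omega
    rw [if_neg hlt, heq, List.idxOf_cons_self]
    simp only [Prod.mk.injEq]
    refine ⟨by simp, ?_⟩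
    rw [max_def]; split_ifs <;> omega
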